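-- pv_equiv track=rewrite | github.com/Bocchio/pyre | parsing_utils.py | pyre_split
-- ===== SOURCE A (Python) =====
-- def read_until_sentinel(iterator, sentinel: str) -> str:
--     acc = ''
--     for item in iterator:
--         acc += item
--         if item == sentinel:
--             break
--     return acc
--
-- def pyre_split(stream: str) -> list:
--     """Get a list of lexemes from a stream of code."""
--     # We add a space at the end to force the last item to be added
--     # Modern problems require modern solutions
--     stream = stream.strip() + ' '
--
--     items = []
--     acc = ''
--     stream_iterator = iter(stream)
--     for c in stream_iterator:
--         if c == '"' or c == "'":
--             assert acc == ''
--             acc = c + read_until_sentinel(stream_iterator, sentinel=c)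
--         elif c == '[':
--             acc += c + read_until_sentinel(stream_iterator, sentinel=']')
--         elif c.isspace():
--             if acc != '':
--                 items.append(acc)
--                 acc = ''
--             continue
--         else:
--             acc += c
--     return items
-- ===== SOURCE B (Python) =====
-- def pyre_split(stream: str) -> list:
--     """Get a list of lexemes from a stream of code (index-based scanner)."""
--     stream = stream.strip() + ' '
--     n = len(stream)
--     items = []
--     acc = ''
--     i = 0
--     while i < n:
--         c = stream[i]
--         if c == '"' or c == "'":
--             assert acc == ''
--             j = stream.find(c, i + 1)
--             if j == -1:
--                 acc = stream[i:]
--                 i = n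
--             else:
--                 acc = stream[i:j + 1]
--                 i = j + 1
--         elif c == '[':
--             j = stream.find(']', i + 1)
--             if j == -1:
--                 acc += stream[i:]
--                 i = n
--             else:
--                 acc += stream[i:j + 1]
--                 i = j + 1
--         elif c.isspace():
--             if acc != '':
--                 items.append(acc)
--                 acc = ''
--             i += 1
--         else:
--             acc += c
--             i += 1
--     return items
-- ===== Notes on version B (the rewrite author's own statement) =====
-- stated objective: simpler
-- what changed: Replaced the shared-iterator tokenizer (a helper consuming the same iterator to read until a sentinel) with a single index-based while-loop that locates closing quotes/brackets with str.find and takes slices; no helper function and no iterator sharing.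
import Mathlib
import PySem

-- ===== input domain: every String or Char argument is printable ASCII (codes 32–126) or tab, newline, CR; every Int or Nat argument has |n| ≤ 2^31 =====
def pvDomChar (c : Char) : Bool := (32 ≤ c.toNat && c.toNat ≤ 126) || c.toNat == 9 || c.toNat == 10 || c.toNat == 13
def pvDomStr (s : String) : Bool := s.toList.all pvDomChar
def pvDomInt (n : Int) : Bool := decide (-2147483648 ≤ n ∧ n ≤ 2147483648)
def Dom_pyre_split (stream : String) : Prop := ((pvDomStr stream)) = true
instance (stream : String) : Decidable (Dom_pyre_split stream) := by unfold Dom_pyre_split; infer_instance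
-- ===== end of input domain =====

-- B rewrites the iterator-consuming tokenizer as an index-based scanner using str.find, for a simpler decomposition (no shared-iterator helper).

-- ===== PORT A =====
-- read_until_sentinel: consume the shared iterator (here: the remaining char list),
-- returning (chars read incl. the sentinel if found, remaining chars).
def readUntil : List Char → Char → (List Char × List Char)
  | [], _ => ([], [])
  | c :: rest, s =>
    if c = s then ([c], rest)
    else (c :: (readUntil rest s).1, (readUntil rest s).2)

-- needed by the ports' termination proofs
lemma readUntil_snd_length (cs : List Char) (s : Char) : (readUntil cs s).2.length ≤ cs.length := by
  induction cs with
  | nil => simp [readUntil]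
  | cons c rest ih =>
    simp only [readUntil]
    split
    · simp
    · simpa using Nat.le_succ_of_le ih

-- the main for-loop of A over the character stream, state (acc, items)
def pyreGoA : List Char → List Char → List String → List String
  | [], _, items => items
  | c :: rest, acc, items =>
    if c = '"' ∨ c = '\'' then
      -- `assert acc == ''` raises AssertionError when acc ≠ '' (excluded by Pre_pyre_split)
      pyreGoA (readUntil rest c).2 (c :: (readUntil rest c).1) items
    else if c = '[' then
      pyreGoA (readUntil rest ']').2 (acc ++ '[' :: (readUntil rest ']').1) items
    else if PySem.Chars.isspace c then
      if acc ≠ [] then pyreGoA rest [] (items ++ [String.ofList acc])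
      else pyreGoA rest acc items
    else pyreGoA rest (acc ++ [c]) items
  termination_by cs => cs.length
  decreasing_by
  · exact Nat.lt_succ_of_le (readUntil_snd_length _ _)
  · exact Nat.lt_succ_of_le (readUntil_snd_length _ _)
  · simp
  · simp
  · simp

def pyre_split (stream : String) : List String :=
  pyreGoA (PySem.Chars.strip stream.toList ++ [' ']) [] []

-- ===== PORT B =====
-- needed by pyreGoB's termination proof: a found sentinel lies at an index ≥ i+1
lemma findFrom_succ_le (s : List Char) (c : Char) (i : Nat) (hi : i < s.length)
    (hne : PySem.Chars.findFrom s [c] ((i : Int) + 1) none ≠ -1) :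
    i + 1 ≤ (PySem.Chars.findFrom s [c] ((i : Int) + 1) none).toNat := by
  have h1 : ((i : Int) + 1) = ((i + 1 : Nat) : Int) := by push_cast; ring
  rw [h1] at hne ⊢
  have := (PySem.Chars.findFrom_natCast_spec s [c] (i + 1) (by omega) hne).1
  omega

-- the while-loop of B: index i over the fixed char list s, state (acc, items)
def pyreGoB (s : List Char) (i : Nat) (acc : List Char) (items : List String) : List String :=
  if h : i < s.length then
    if s[i] = '"' ∨ s[i] = '\'' then
      -- `assert acc == ''` raises AssertionError when acc ≠ '' (excluded by Pre_pyre_split)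
      if hj : PySem.Chars.findFrom s [s[i]] ((i : Int) + 1) none = -1 then
        pyreGoB s s.length (PySem.List.slice s (some (i : Int)) none) items
      else
        pyreGoB s ((PySem.Chars.findFrom s [s[i]] ((i : Int) + 1) none).toNat + 1)
          (PySem.List.slice s (some (i : Int))
            (some (PySem.Chars.findFrom s [s[i]] ((i : Int) + 1) none + 1))) items
    else if s[i] = '[' then
      if hj : PySem.Chars.findFrom s [']'] ((i : Int) + 1) none = -1 then
        pyreGoB s s.length (acc ++ PySem.List.slice s (some (i : Int)) none) items
      else
        pyreGoB s ((PySem.Chars.findFrom s [']'] ((i : Int) + 1) none).toNat + 1)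
          (acc ++ PySem.List.slice s (some (i : Int))
            (some (PySem.Chars.findFrom s [']'] ((i : Int) + 1) none + 1))) items
    else if PySem.Chars.isspace s[i] then
      if acc ≠ [] then pyreGoB s (i + 1) [] (items ++ [String.ofList acc])
      else pyreGoB s (i + 1) acc items
    else pyreGoB s (i + 1) (acc ++ [s[i]]) items
  else items
  termination_by s.length - i
  decreasing_by
  · omega
  · have := findFrom_succ_le s (s[i]) i h (by assumption)
    omega
  · omega
  · have := findFrom_succ_le s ']' i h (by assumption)
    omega
  · omega
  · omega
  · omega

def pyre_split_alt (stream : String) : List String :=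
  pyreGoB (PySem.Chars.strip stream.toList ++ [' ']) 0 [] []

-- ===== PRECONDITION & SPEC =====
-- DFA over the stream deciding whether A's `assert acc == ''` ever fires:
-- mode none = top level, mode (some sent) = inside a quote/bracket segment open until sent;
-- accEmpty tracks only whether the current lexeme accumulator is empty
def preScan : List Char → Option Char → Bool → Bool
  | [], _, _ => true
  | c :: rest, some sent, _ =>
    if c = sent then preScan rest none false else preScan rest (some sent) false
  | c :: rest, none, accEmpty =>
    if c = '"' ∨ c = '\'' then accEmpty && preScan rest (some c) false
    else if c = '[' then preScan rest (some ']') false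
    else if PySem.Chars.isspace c then preScan rest none true
    else preScan rest none false

-- Pre_ excludes exactly the inputs on which A (and B) raise AssertionError: a quote
-- character reached while the current lexeme accumulator is non-empty.
def Pre_pyre_split (stream : String) : Prop :=
  preScan (PySem.Chars.strip stream.toList ++ [' ']) none true = true
instance (stream : String) : Decidable (Pre_pyre_split stream) := by
  unfold Pre_pyre_split; infer_instance

def pvWitness_pyre_split : String := "a [b c] 'd e'"

def Spec_pyre_split (stream : String) (out : List String) : Prop := out = pyre_split_alt stream
instance (stream : String) (out : List String) : Decidable (Spec_pyre_split stream out) := by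
  unfold Spec_pyre_split; infer_instance

-- ===== CLAIM (what is proved, stated in full; the proofs are below) =====
def Claim_equal_pyre_split : Prop := ∀ (stream : String), Dom_pyre_split stream → Pre_pyre_split stream → Spec_pyre_split stream (pyre_split stream)

-- ===== LEMMAS AND PROOFS =====
lemma single_prefix_iff (c : Char) (l : List Char) : [c] <+: l ↔ ∃ t, l = c :: t := by
  constructor
  · rintro ⟨t, rfl⟩; exact ⟨t, rfl⟩
  · rintro ⟨t, rfl⟩; exact ⟨t, rfl⟩

lemma find_cons_single (a c : Char) (cs : List Char) :
    PySem.Chars.find (a :: cs) [c] =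
      if a = c then 0
      else if PySem.Chars.find cs [c] = -1 then -1
      else PySem.Chars.find cs [c] + 1 := by
  by_cases hac : a = c
  · subst hac
    rw [if_pos rfl]
    have hinf : [a] <:+: (a :: cs) := (List.singleton_infix_iff a _).2 (by simp)
    have h0 : 0 ≤ PySem.Chars.find (a :: cs) [a] :=
      (PySem.Chars.find_nonneg_iff _ _).2 hinf
    obtain ⟨hpre, hmin⟩ := PySem.Chars.find_spec h0
    have htn : (PySem.Chars.find (a :: cs) [a]).toNat = 0 := by
      by_contra hne
      exact hmin 0 (by omega) ((single_prefix_iff _ _).2 ⟨cs, rfl⟩)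
    omega
  · rw [if_neg hac]
    by_cases hf : PySem.Chars.find cs [c] = -1
    · rw [if_pos hf]
      rw [PySem.Chars.find_eq_neg_one_iff] at hf ⊢
      intro hinf
      rcases (List.infix_cons_iff).1 hinf with hpre | hinf'
      · obtain ⟨t, ht⟩ := (single_prefix_iff _ _).1 hpre
        exact hac (List.cons.inj ht).1
      · exact hf hinf'
    · rw [if_neg hf]
      have h0 : 0 ≤ PySem.Chars.find cs [c] := by
        have := PySem.Chars.neg_one_le_find cs [c]
        omega
      obtain ⟨hpre, hmin⟩ := PySem.Chars.find_spec h0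
      have hinf : [c] <:+: (a :: cs) :=
        List.infix_cons ((List.infix_iff_prefix_suffix).2 ⟨_, hpre, List.drop_suffix _ _⟩)
      have h0' : 0 ≤ PySem.Chars.find (a :: cs) [c] :=
        (PySem.Chars.find_nonneg_iff _ _).2 hinf
      obtain ⟨hpre', hmin'⟩ := PySem.Chars.find_spec h0'
      have hm0 : (PySem.Chars.find (a :: cs) [c]).toNat ≠ 0 := by
        intro h
        rw [h, List.drop_zero] at hpre'
        obtain ⟨t, ht⟩ := (single_prefix_iff _ _).1 hpre'
        exact hac (List.cons.inj ht).1
      have hdropm : (a :: cs).drop (PySem.Chars.find (a :: cs) [c]).toNat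
          = cs.drop ((PySem.Chars.find (a :: cs) [c]).toNat - 1) := by
        cases h : (PySem.Chars.find (a :: cs) [c]).toNat with
        | zero => omega
        | succ m' => simp
      have hk_le : (PySem.Chars.find cs [c]).toNat
          ≤ (PySem.Chars.find (a :: cs) [c]).toNat - 1 := by
        by_contra hlt
        exact hmin _ (by omega) (hdropm ▸ hpre')
      have hm_le : (PySem.Chars.find (a :: cs) [c]).toNat
          ≤ (PySem.Chars.find cs [c]).toNat + 1 := by
        by_contra hlt
        exact hmin' ((PySem.Chars.find cs [c]).toNat + 1) (by omega) (by simpa using hpre)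
      omega

lemma readUntil_eq_find (cs : List Char) (c : Char) :
    readUntil cs c =
      if PySem.Chars.find cs [c] = -1 then (cs, ([] : List Char))
      else (cs.take ((PySem.Chars.find cs [c]).toNat + 1),
            cs.drop ((PySem.Chars.find cs [c]).toNat + 1)) := by
  induction cs with
  | nil =>
    have h : PySem.Chars.find ([] : List Char) [c] = -1 := by
      rw [PySem.Chars.find_eq_neg_one_iff]
      intro h
      simpa using h.length_le
    simp [readUntil, h]
  | cons a rest ih =>
    rw [readUntil, find_cons_single]
    by_cases hac : a = c
    · subst hac; simp
    · rw [if_neg hac, if_neg hac]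
      by_cases hf : PySem.Chars.find rest [c] = -1
      · simp [hf, ih]
      · have h0 : 0 ≤ PySem.Chars.find rest [c] := by
          have := PySem.Chars.neg_one_le_find rest [c]
          omega
        have hne : PySem.Chars.find rest [c] + 1 ≠ -1 := by omega
        rw [if_neg hf, if_neg hne, ih, if_neg hf]
        have h2 : (PySem.Chars.find rest [c] + 1).toNat
            = (PySem.Chars.find rest [c]).toNat + 1 := by omega
        simp [h2]

lemma goB_eq_goA (s : List Char) (d i : Nat) (acc : List Char) (items : List String)
    (hi : i ≤ s.length) (hd : s.length - i ≤ d) :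
    pyreGoB s i acc items = pyreGoA (s.drop i) acc items := by
  induction d generalizing i acc items with
  | zero =>
    have hieq : i = s.length := by omega
    subst hieq
    rw [pyreGoB, dif_neg (lt_irrefl _), List.drop_length, pyreGoA]
  | succ d ih =>
    by_cases h : i < s.length
    · rw [pyreGoB, dif_pos h]
      conv_rhs => rw [← List.getElem_cons_drop h, pyreGoA]
      have hcast : ((i : Int) + 1) = ((i + 1 : Nat) : Int) := by push_cast; ring
      by_cases hq : s[i] = '"' ∨ s[i] = '\''
      · rw [if_pos hq, if_pos hq, hcast,
          PySem.Chars.findFrom_natCast s [s[i]] (i + 1) (by omega),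
          readUntil_eq_find]
        by_cases hfind : PySem.Chars.find (s.drop (i + 1)) [s[i]] = -1
        · rw [if_pos hfind, if_pos hfind, dif_pos rfl,
            ih s.length _ _ le_rfl (by omega), List.drop_length, pyreGoA, pyreGoA]
        · have h0 : 0 ≤ PySem.Chars.find (s.drop (i + 1)) [s[i]] := by
            have := PySem.Chars.neg_one_le_find (s.drop (i + 1)) [s[i]]
            omega
          obtain ⟨hpre, -⟩ := PySem.Chars.find_spec h0
          obtain ⟨t, ht⟩ := (single_prefix_iff _ _).1 hpre
          have hklt : (PySem.Chars.find (s.drop (i + 1)) [s[i]]).toNat < s.length - (i + 1) := by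
            have := congrArg List.length ht
            simp at this
            omega
          have hjne : ((i + 1 : Nat) : Int) + PySem.Chars.find (s.drop (i + 1)) [s[i]] ≠ -1 := by
            omega
          rw [if_neg hfind, if_neg hfind, dif_neg hjne]
          have htn : (((i + 1 : Nat) : Int) + PySem.Chars.find (s.drop (i + 1)) [s[i]]).toNat + 1
              = i + (PySem.Chars.find (s.drop (i + 1)) [s[i]]).toNat + 2 := by omega
          have hsl : ((i + 1 : Nat) : Int) + PySem.Chars.find (s.drop (i + 1)) [s[i]] + 1
              = (i : Int) + (((PySem.Chars.find (s.drop (i + 1)) [s[i]]).toNat + 2 : Nat) : Int) := by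
            omega
          rw [htn, hsl, PySem.List.slice_natCast_add,
            ih (i + (PySem.Chars.find (s.drop (i + 1)) [s[i]]).toNat + 2) _ _ (by omega) (by omega)]
          have hdd : List.drop ((PySem.Chars.find (s.drop (i + 1)) [s[i]]).toNat + 1) (s.drop (i + 1))
              = s.drop (i + (PySem.Chars.find (s.drop (i + 1)) [s[i]]).toNat + 2) := by
            rw [List.drop_drop]
            congr 1
            omega
          have hacc : (s.drop i).take ((PySem.Chars.find (s.drop (i + 1)) [s[i]]).toNat + 2)
              = s[i] :: (s.drop (i + 1)).take ((PySem.Chars.find (s.drop (i + 1)) [s[i]]).toNat + 1) := by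
            conv_lhs => rw [← List.getElem_cons_drop h]
            rw [List.take_succ_cons]
          rw [hdd, hacc]
      · rw [if_neg hq, if_neg hq]
        by_cases hbr : s[i] = '['
        · rw [if_pos hbr, if_pos hbr, hcast,
            PySem.Chars.findFrom_natCast s [']'] (i + 1) (by omega),
            readUntil_eq_find]
          by_cases hfind : PySem.Chars.find (s.drop (i + 1)) [']'] = -1
          · rw [if_pos hfind, if_pos hfind, dif_pos rfl,
              ih s.length _ _ le_rfl (by omega), List.drop_length, pyreGoA, pyreGoA]
          · have h0 : 0 ≤ PySem.Chars.find (s.drop (i + 1)) [']'] := by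
              have := PySem.Chars.neg_one_le_find (s.drop (i + 1)) [']']
              omega
            obtain ⟨hpre, -⟩ := PySem.Chars.find_spec h0
            obtain ⟨t, ht⟩ := (single_prefix_iff _ _).1 hpre
            have hklt : (PySem.Chars.find (s.drop (i + 1)) [']']).toNat < s.length - (i + 1) := by
              have := congrArg List.length ht
              simp at this
              omega
            have hjne : ((i + 1 : Nat) : Int) + PySem.Chars.find (s.drop (i + 1)) [']'] ≠ -1 := by
              omega
            rw [if_neg hfind, if_neg hfind, dif_neg hjne]
            have htn : (((i + 1 : Nat) : Int) + PySem.Chars.find (s.drop (i + 1)) [']']).toNat + 1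
                = i + (PySem.Chars.find (s.drop (i + 1)) [']']).toNat + 2 := by omega
            have hsl : ((i + 1 : Nat) : Int) + PySem.Chars.find (s.drop (i + 1)) [']'] + 1
                = (i : Int) + (((PySem.Chars.find (s.drop (i + 1)) [']']).toNat + 2 : Nat) : Int) := by
              omega
            rw [htn, hsl, PySem.List.slice_natCast_add,
              ih (i + (PySem.Chars.find (s.drop (i + 1)) [']']).toNat + 2) _ _ (by omega) (by omega)]
            have hdd : List.drop ((PySem.Chars.find (s.drop (i + 1)) [']']).toNat + 1) (s.drop (i + 1))
                = s.drop (i + (PySem.Chars.find (s.drop (i + 1)) [']']).toNat + 2) := by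
              rw [List.drop_drop]
              congr 1
              omega
            have hacc : (s.drop i).take ((PySem.Chars.find (s.drop (i + 1)) [']']).toNat + 2)
                = s[i] :: (s.drop (i + 1)).take ((PySem.Chars.find (s.drop (i + 1)) [']']).toNat + 1) := by
              conv_lhs => rw [← List.getElem_cons_drop h]
              rw [List.take_succ_cons]
            rw [hdd, hacc, hbr]
        · rw [if_neg hbr, if_neg hbr]
          by_cases hsp : PySem.Chars.isspace s[i] = true
          · rw [if_pos hsp, if_pos hsp]
            by_cases hacc : acc ≠ []
            · rw [if_pos hacc, if_pos hacc, ih (i + 1) _ _ (by omega) (by omega)]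
            · rw [if_neg hacc, if_neg hacc, ih (i + 1) _ _ (by omega) (by omega)]
          · rw [if_neg hsp, if_neg hsp, ih (i + 1) _ _ (by omega) (by omega)]
    · have hieq : i = s.length := by omega
      subst hieq
      rw [pyreGoB, dif_neg (lt_irrefl _), List.drop_length, pyreGoA]

-- ===== VERDICT (by name: the statement is the Claim_ definition above) =====
theorem pyre_split_spec : Claim_equal_pyre_split := by
  intro stream _ _
  unfold Spec_pyre_split pyre_split pyre_split_alt
  rw [goB_eq_goA _ (PySem.Chars.strip stream.toList ++ [' ']).length 0 [] []
    (by omega) (by omega), List.drop_zero]
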